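-- pv_equiv track=rewrite | github.com/tyreamer/rekall | src/rekall/core/reducer.py | extract_open_decisions
-- ===== SOURCE A (Python) =====
-- from typing import Any, Dict, List, Optional, Tuple
--
-- def extract_open_decisions(events: List[Dict[str, Any]]) -> List[Dict[str, Any]]:
--     """Open decisions sorted newest-first, max 5."""
--     result = []
--     for d in sorted(events, key=lambda x: x.get("timestamp", ""), reverse=True):
--         if d.get("status") in ("proposed", "pending"):
--             result.append({
--                 "decision_id": d.get("decision_id", ""),
--                 "title": d.get("title", ""),
--                 "status": d.get("status", ""),
--                 "timestamp": d.get("timestamp", ""),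
--             })
--             if len(result) >= 5:
--                 break
--     return result
-- ===== SOURCE B (Python) =====
-- def extract_open_decisions(events):
--     """Open decisions sorted newest-first, max 5."""
--     top = []  # at most 5 events, ordered by timestamp desc, ties by arrival order
--     for d in events:
--         if d.get("status") not in ("proposed", "pending"):
--             continue
--         ts = d.get("timestamp", "")
--         i = 0
--         while i < len(top) and not ts > top[i].get("timestamp", ""):
--             i += 1
--         top.insert(i, d)
--         if len(top) > 5:
--             top.pop()
--     return [
--         {
--             "decision_id": d.get("decision_id", ""),
--             "title": d.get("title", ""),
--             "status": d.get("status", ""),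
--             "timestamp": d.get("timestamp", ""),
--         }
--         for d in top
--     ]
-- ===== Notes on version B (the rewrite author's own statement) =====
-- stated objective: alternative
-- what changed: B never sorts: a single pass maintains a bounded (size-5) ordered buffer of the best open events via positional insertion and eviction of the 6th element, replacing A's global sort of all events followed by a filtered scan with early break.
import Mathlib
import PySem

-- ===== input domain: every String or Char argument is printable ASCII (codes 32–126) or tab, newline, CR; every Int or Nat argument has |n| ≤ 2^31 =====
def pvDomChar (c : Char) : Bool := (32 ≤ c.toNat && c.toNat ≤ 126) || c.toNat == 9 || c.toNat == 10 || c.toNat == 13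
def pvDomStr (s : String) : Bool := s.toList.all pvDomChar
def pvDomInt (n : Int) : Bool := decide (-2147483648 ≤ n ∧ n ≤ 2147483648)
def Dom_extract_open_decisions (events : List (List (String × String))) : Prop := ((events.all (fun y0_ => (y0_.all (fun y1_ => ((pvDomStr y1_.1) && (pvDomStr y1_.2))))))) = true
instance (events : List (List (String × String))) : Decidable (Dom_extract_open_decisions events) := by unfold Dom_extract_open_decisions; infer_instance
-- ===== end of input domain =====

-- B never sorts: one pass keeps a bounded (≤5) ordered buffer of the best open events via
-- positional insertion + eviction, instead of A's global sort followed by a filtered scan with break.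


-- ===== PORT A =====
-- shared helpers: the Python `d.get(...)` calls, the status test, the result-dict literal, the sort key
def pvGetD (d : List (String × String)) (k dflt : String) : String := PySem.Dict.getD ⟨d⟩ k dflt
def pvGet? (d : List (String × String)) (k : String) : Option String := PySem.Dict.get? ⟨d⟩ k
def pvIsOpen (d : List (String × String)) : Bool :=
  pvGet? d "status" == some "proposed" || pvGet? d "status" == some "pending"
def pvMk (d : List (String × String)) : List (String × String) :=
  [("decision_id", pvGetD d "decision_id" ""), ("title", pvGetD d "title" ""),
   ("status", pvGetD d "status" ""), ("timestamp", pvGetD d "timestamp" "")]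
def pvKey (d : List (String × String)) : String := pvGetD d "timestamp" ""

-- A's for-loop with append and `break` once len(result) >= 5
def pvLoopA : List (List (String × String)) → List (List (String × String)) → List (List (String × String))
  | [], result => result
  | d :: rest, result =>
    if pvIsOpen d then
      let result' := result ++ [pvMk d]
      if 5 ≤ result'.length then result' else pvLoopA rest result'
    else pvLoopA rest result

def extract_open_decisions (events : List (List (String × String))) : List (List (String × String)) :=
  pvLoopA (PySem.List.sorted events pvKey true) []

-- ===== PORT B =====
-- B's while-loop insertion: walk past every buffered event whose timestamp is not smaller,
-- insert d there (stable for equal timestamps: the newcomer goes after them)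
def pvInsertB (d : List (String × String)) : List (List (String × String)) → List (List (String × String))
  | [] => [d]
  | y :: ys => if pvKey y < pvKey d then d :: y :: ys else y :: pvInsertB d ys

-- B's loop body: skip non-open events; insert, then `top.pop()` once the buffer exceeds 5
def pvStepB (acc : List (List (String × String))) (d : List (String × String)) :
    List (List (String × String)) :=
  if pvIsOpen d then
    let t := pvInsertB d acc
    if 5 < t.length then t.dropLast else t
  else acc

def extract_open_decisions_alt (events : List (List (String × String))) : List (List (String × String)) :=
  (events.foldl pvStepB []).map pvMk

-- ===== PRECONDITION & SPEC =====
def Spec_extract_open_decisions (events : List (List (String × String))) (out : List (List (String × String))) : Prop := out = extract_open_decisions_alt events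
instance (events : List (List (String × String))) (out : List (List (String × String))) : Decidable (Spec_extract_open_decisions events out) := by unfold Spec_extract_open_decisions; infer_instance

-- ===== CLAIM (what is proved, stated in full; the proofs are below) =====
def Claim_equal_extract_open_decisions : Prop := ∀ (events : List (List (String × String))), Dom_extract_open_decisions events → Spec_extract_open_decisions events (extract_open_decisions events)

-- ===== LEMMAS AND PROOFS =====

-- A's loop collects (and maps) the first `5 - result.length` open events of the remaining list
theorem pvLoopA_eq (l : List (List (String × String))) :
    ∀ result, result.length < 5 →
      pvLoopA l result = result ++ ((l.filter pvIsOpen).take (5 - result.length)).map pvMk := by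
  induction l with
  | nil => intro result _; simp [pvLoopA]
  | cons d rest ih =>
    intro result hlen
    by_cases hp : pvIsOpen d
    · simp only [pvLoopA, hp, if_true, List.length_append, List.length_cons, List.length_nil]
      by_cases h5 : 5 ≤ result.length + (0 + 1)
      · have : 5 - result.length = 1 := by omega
        simp [h5, hp, this]
      · have h' : (result ++ [pvMk d]).length < 5 := by simp; omega
        rw [if_neg (by simpa using h5), ih _ h']
        have : 5 - result.length = (5 - (result ++ [pvMk d]).length) + 1 := by simp; omega
        simp [hp, this, List.take_succ_cons]
    · simp [pvLoopA, hp, ih _ hlen]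

-- insertBy on a cons, as an if-equation
theorem insertBy_cons {α : Type} (before : α → α → Bool) (x y : α) (ys : List α) :
    PySem.List.insertBy before x (y :: ys) =
      if before x y then x :: y :: ys else y :: PySem.List.insertBy before x ys := rfl

-- insert before everything when x goes before every element
theorem insertBy_cons_of_forall {α : Type} (before : α → α → Bool) (x : α) (l : List α)
    (h : ∀ y ∈ l, before x y = true) : PySem.List.insertBy before x l = x :: l := by
  cases l with
  | nil => rfl
  | cons y ys => rw [insertBy_cons, if_pos (h y (by simp))]

-- insertBy with the reverse comparison preserves the descending-key invariant
theorem pairwise_insertBy {α : Type} (key : α → String) (x : α) :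
    ∀ acc : List α, acc.Pairwise (fun a b => key b ≤ key a) →
      (PySem.List.insertBy (fun a b => decide (key b < key a)) x acc).Pairwise (fun a b => key b ≤ key a) := by
  intro acc
  induction acc with
  | nil => intro _; simp [PySem.List.insertBy]
  | cons y ys ih =>
    intro h
    rw [List.pairwise_cons] at h
    rw [insertBy_cons]
    cases hxy : decide (key y < key x) with
    | true =>
      rw [if_pos rfl]
      have hlt : key y < key x := of_decide_eq_true hxy
      refine List.pairwise_cons.2 ⟨?_, List.pairwise_cons.2 h⟩
      intro z hz
      rcases List.mem_cons.1 hz with rfl | hz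
      · exact le_of_lt hlt
      · exact le_trans (h.1 z hz) (le_of_lt hlt)
    | false =>
      rw [if_neg Bool.false_ne_true]
      have hle : key x ≤ key y := not_lt.1 (of_decide_eq_false hxy)
      refine List.pairwise_cons.2 ⟨?_, ih h.2⟩
      intro z hz
      rcases (PySem.List.mem_insertBy _ x z ys).1 hz with rfl | hz
      · exact hle
      · exact h.1 z hz

-- on a descending accumulator, filtering commutes with one stable insertion
theorem filter_insertBy (p : List (String × String) → Bool) (x : List (String × String)) :
    ∀ acc : List (List (String × String)), acc.Pairwise (fun a b => pvKey b ≤ pvKey a) →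
      (PySem.List.insertBy (fun a b => decide (pvKey b < pvKey a)) x acc).filter p =
        if p x then PySem.List.insertBy (fun a b => decide (pvKey b < pvKey a)) x (acc.filter p)
        else acc.filter p := by
  intro acc
  induction acc with
  | nil => intro _; cases hpx : p x <;> simp [PySem.List.insertBy, hpx]
  | cons y ys ih =>
    intro h
    rw [List.pairwise_cons] at h
    rw [insertBy_cons]
    cases hxy : decide (pvKey y < pvKey x) with
    | true =>
      rw [if_pos rfl]
      cases hpx : p x with
      | false => simp [List.filter_cons, hpx]
      | true =>
        cases hpy : p y with
        | true =>
          simp only [List.filter_cons, hpx, hpy, if_true]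
          rw [insertBy_cons, if_pos hxy]
        | false =>
          simp only [List.filter_cons, hpx, hpy, if_true, Bool.false_eq_true, if_false]
          have hall : ∀ z ∈ List.filter p ys, decide (pvKey z < pvKey x) = true := by
            intro z hz
            have hzys : z ∈ ys := List.mem_of_mem_filter hz
            have hzy : pvKey z ≤ pvKey y := h.1 z hzys
            exact decide_eq_true (lt_of_le_of_lt hzy (of_decide_eq_true hxy))
          rw [insertBy_cons_of_forall _ _ _ hall]
    | false =>
      rw [if_neg Bool.false_ne_true]
      cases hpy : p y with
      | true =>
        simp only [List.filter_cons, hpy, if_true]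
        rw [ih h.2]
        cases hpx : p x with
        | false => simp
        | true =>
          simp only [if_true]
          rw [insertBy_cons, if_neg (by rw [hxy]; exact Bool.false_ne_true)]
      | false =>
        simp only [List.filter_cons, hpy, Bool.false_eq_true, if_false]
        exact ih h.2

-- filtering commutes with the whole insertion-sort fold, given a descending accumulator
theorem filter_foldl_insertBy (p : List (String × String) → Bool) :
    ∀ (xs acc : List (List (String × String))), acc.Pairwise (fun a b => pvKey b ≤ pvKey a) →
      (xs.foldl (fun acc x => PySem.List.insertBy (fun a b => decide (pvKey b < pvKey a)) x acc) acc).filter p =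
        (xs.filter p).foldl (fun acc x => PySem.List.insertBy (fun a b => decide (pvKey b < pvKey a)) x acc) (acc.filter p) := by
  intro xs
  induction xs with
  | nil => intro acc _; simp
  | cons x rest ih =>
    intro acc h
    simp only [List.foldl_cons, List.filter_cons]
    rw [ih _ (pairwise_insertBy pvKey x acc h), filter_insertBy p x acc h]
    cases hpx : p x <;> simp

-- stable sort commutes with filter
theorem sorted_filter_comm (p : List (String × String) → Bool) (xs : List (List (String × String))) :
    (PySem.List.sorted xs pvKey true).filter p = PySem.List.sorted (xs.filter p) pvKey true := by
  rw [PySem.List.sorted_rev_eq_foldl_insertBy, PySem.List.sorted_rev_eq_foldl_insertBy]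
  simpa using filter_foldl_insertBy p xs [] (by simp)

-- ===== B-side lemmas =====

-- B's hand-written insertion IS stable insertion with the reverse comparison
theorem pvInsertB_eq (d : List (String × String)) :
    ∀ l, pvInsertB d l = PySem.List.insertBy (fun a b => decide (pvKey b < pvKey a)) d l := by
  intro l
  induction l with
  | nil => rfl
  | cons y ys ih =>
    rw [insertBy_cons]
    simp only [pvInsertB]
    by_cases h : pvKey y < pvKey d
    · simp [h]
    · simp [h, ih]

theorem length_insertBy {α : Type} (before : α → α → Bool) (x : α) :
    ∀ l : List α, (PySem.List.insertBy before x l).length = l.length + 1 := by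
  intro l
  induction l with
  | nil => rfl
  | cons y ys ih =>
    rw [insertBy_cons]
    by_cases h : before x y = true
    · simp [h]
    · rw [if_neg h]; simp [ih]

-- a cons-take can forget what lies past the cut
theorem take_cons_take {α : Type} (y : α) : ∀ (j : ℕ) (l : List α),
    (y :: l.take j).take j = (y :: l).take j := by
  intro j l
  cases j with
  | zero => rfl
  | succ i =>
    simp only [List.take_succ_cons, List.take_take]
    rw [Nat.min_eq_left (Nat.le_succ i)]

-- only the first k slots of the buffer can influence the first k slots after an insertion
theorem take_insertBy {α : Type} (before : α → α → Bool) (x : α) :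
    ∀ (l : List α) (k : ℕ),
      (PySem.List.insertBy before x l).take k = (PySem.List.insertBy before x (l.take k)).take k := by
  intro l
  induction l with
  | nil => intro k; simp
  | cons y ys ih =>
    intro k
    cases k with
    | zero => simp
    | succ j =>
      rw [insertBy_cons, List.take_succ_cons, insertBy_cons]
      by_cases h : before x y = true
      · simp only [h, if_true, List.take_succ_cons]
        rw [take_cons_take]
      · rw [if_neg h, if_neg h]
        simp only [List.take_succ_cons]
        rw [ih j]

-- on a buffer of ≤ 5 events, B's insert-then-pop step is `take 5` of the stable insertion
theorem pvStepB_eq (acc : List (List (String × String))) (d : List (String × String))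
    (hlen : acc.length ≤ 5) :
    pvStepB acc d =
      if pvIsOpen d then
        (PySem.List.insertBy (fun a b => decide (pvKey b < pvKey a)) d acc).take 5
      else acc := by
  unfold pvStepB
  by_cases hp : pvIsOpen d
  · simp only [hp, if_true]
    rw [pvInsertB_eq]
    set t := PySem.List.insertBy (fun a b => decide (pvKey b < pvKey a)) d acc with ht
    have hlt : t.length = acc.length + 1 := by rw [ht, length_insertBy]
    by_cases h6 : 5 < t.length
    · have h6' : t.length = 6 := by omega
      rw [if_pos h6, List.dropLast_eq_take, h6']
    · rw [if_neg h6, List.take_of_length_le (by omega)]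
  · simp [hp]

-- B's bounded pass computes `take 5` of the full insertion-sort fold over the open events
theorem foldl_stepB_eq : ∀ (xs acc : List (List (String × String))),
    xs.foldl pvStepB (acc.take 5) =
      (xs.foldl (fun a x => if pvIsOpen x then
          PySem.List.insertBy (fun a b => decide (pvKey b < pvKey a)) x a else a) acc).take 5 := by
  intro xs
  induction xs with
  | nil => intro acc; simp
  | cons x rest ih =>
    intro acc
    simp only [List.foldl_cons]
    by_cases hp : pvIsOpen x
    · rw [pvStepB_eq _ _ (List.length_take_le 5 acc), if_pos hp, if_pos hp,
        ← take_insertBy, ih]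
    · rw [pvStepB_eq _ _ (List.length_take_le 5 acc), if_neg hp, if_neg hp, ih]

-- ===== VERDICT (by name: the statement is the Claim_ definition above) =====
theorem extract_open_decisions_spec : Claim_equal_extract_open_decisions := by
  intro events _
  unfold Spec_extract_open_decisions extract_open_decisions extract_open_decisions_alt
  rw [pvLoopA_eq _ [] (by simp), sorted_filter_comm]
  have hB : events.foldl pvStepB [] =
      (PySem.List.sorted (events.filter pvIsOpen) pvKey true).take 5 := by
    rw [PySem.List.sorted_rev_eq_foldl_insertBy, List.foldl_filter]
    simpa using foldl_stepB_eq events []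
  rw [hB]
  simp
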